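-- pv_equiv track=rewrite | github.com/Appah147/2025A-TP2 | Exercice3.py | mettre_a_jour_inventaire
-- ===== SOURCE A (Python) =====
-- def mettre_a_jour_inventaire(inventaire, recette, quantite=1):
--     """
--     Met à jour l'inventaire après la préparation d'une recette.
--
--     Args:
--         inventaire (dict): Stock actuel
--         recette (dict): Ingrédients utilisés
--         quantite (int): Nombre de fois que la recette est préparée
--
--     Returns:
--         dict: Inventaire mis à jour
--     """
--     nouvel_inventaire = inventaire.copy()
--
--     # TODO: Soustraire les ingrédients utilisés de l'inventaire
--     # Multiplier par la quantité si plusieurs portions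
--
--     for ingredient, quantiteUtilisee in recette.items():
--         if ingredient in nouvel_inventaire:
--             nouvel_inventaire[ingredient] -= quantiteUtilisee * quantite
--
--             if nouvel_inventaire[ingredient] < 0:
--                 nouvel_inventaire[ingredient] = 0
--
--     return nouvel_inventaire
-- ===== SOURCE B (Python) =====
-- def mettre_a_jour_inventaire(inventaire, recette, quantite=1):
--     return {ingr: max(0, qte - recette[ingr] * quantite) if ingr in recette else qte
--             for ingr, qte in inventaire.items()}
-- ===== Notes on version B (the rewrite author's own statement) =====
-- stated objective: idiomatic
-- what changed: B builds the result as a dict comprehension over the inventory (clamped subtraction for recipe ingredients, unchanged value otherwise) instead of copying the inventory and mutating it while looping over the recipe.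
import Mathlib
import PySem

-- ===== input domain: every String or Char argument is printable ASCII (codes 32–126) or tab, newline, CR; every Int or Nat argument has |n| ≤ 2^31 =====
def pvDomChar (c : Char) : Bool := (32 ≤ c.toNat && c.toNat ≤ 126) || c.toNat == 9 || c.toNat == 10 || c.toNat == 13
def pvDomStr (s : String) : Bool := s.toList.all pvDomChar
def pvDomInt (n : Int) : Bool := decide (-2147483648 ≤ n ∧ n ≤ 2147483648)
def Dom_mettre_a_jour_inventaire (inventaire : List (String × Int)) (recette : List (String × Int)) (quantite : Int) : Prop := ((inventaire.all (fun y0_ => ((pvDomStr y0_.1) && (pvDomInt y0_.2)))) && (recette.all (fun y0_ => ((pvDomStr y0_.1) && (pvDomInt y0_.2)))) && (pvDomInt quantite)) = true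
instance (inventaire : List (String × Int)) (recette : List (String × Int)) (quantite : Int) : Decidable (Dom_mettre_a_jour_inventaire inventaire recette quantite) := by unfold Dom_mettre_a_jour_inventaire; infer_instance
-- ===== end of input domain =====

-- B rebuilds the inventory as a dict comprehension over inventaire instead of mutating a copy while looping over recette (idiomatic rewrite, same cost).

-- ===== PORT A =====
def mettre_a_jour_inventaire (inventaire : List (String × Int)) (recette : List (String × Int)) (quantite : Int) : List (String × Int) :=
  (recette.foldl (fun d p =>
      if d.contains p.1 then
        let d1 := d.modify p.1 0 (fun v => v - p.2 * quantite)
        if d1.getD p.1 0 < 0 then d1.insert p.1 0 else d1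
      else d)
    (PySem.Dict.mk inventaire)).items

-- ===== PORT B =====
def mettre_a_jour_inventaire_alt (inventaire : List (String × Int)) (recette : List (String × Int)) (quantite : Int) : List (String × Int) :=
  let r : PySem.Dict String Int := PySem.Dict.mk recette
  inventaire.map (fun p => if r.contains p.1 then (p.1, max 0 (p.2 - r.getD p.1 0 * quantite)) else p)

-- ===== PRECONDITION & SPEC =====
-- Both Python arguments are dicts; an association list with duplicate keys does not represent any
-- Python dict, so Pre_ requires distinct keys in each argument. It excludes no input the Python A accepts.
def Pre_mettre_a_jour_inventaire (inventaire : List (String × Int)) (recette : List (String × Int)) (_quantite : Int) : Prop :=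
  (inventaire.map Prod.fst).Nodup ∧ (recette.map Prod.fst).Nodup
instance (inventaire : List (String × Int)) (recette : List (String × Int)) (quantite : Int) : Decidable (Pre_mettre_a_jour_inventaire inventaire recette quantite) := by unfold Pre_mettre_a_jour_inventaire; infer_instance

def pvWitness_mettre_a_jour_inventaire : (List (String × Int)) × (List (String × Int)) × Int :=
  ([("farine", 500), ("sucre", 100)], [("farine", 200), ("sel", 3)], 2)

def Spec_mettre_a_jour_inventaire (inventaire : List (String × Int)) (recette : List (String × Int)) (quantite : Int) (out : List (String × Int)) : Prop := out = mettre_a_jour_inventaire_alt inventaire recette quantite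
instance (inventaire : List (String × Int)) (recette : List (String × Int)) (quantite : Int) (out : List (String × Int)) : Decidable (Spec_mettre_a_jour_inventaire inventaire recette quantite out) := by unfold Spec_mettre_a_jour_inventaire; infer_instance

-- ===== CLAIM (what is proved, stated in full; the proofs are below) =====
def Claim_equal_mettre_a_jour_inventaire : Prop := ∀ (inventaire : List (String × Int)) (recette : List (String × Int)) (quantite : Int), Dom_mettre_a_jour_inventaire inventaire recette quantite → Pre_mettre_a_jour_inventaire inventaire recette quantite → Spec_mettre_a_jour_inventaire inventaire recette quantite (mettre_a_jour_inventaire inventaire recette quantite)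

-- ===== LEMMAS AND PROOFS =====

-- One step of A's loop rewrites exactly the items whose key is the recipe ingredient, clamped at 0.
lemma pv_step_items (quantite : Int) (d : PySem.Dict String Int) (hd : d.keys.Nodup) (ing : String) (qu : Int) :
    (if d.contains ing then
        let d1 := d.modify ing 0 (fun v => v - qu * quantite)
        if d1.getD ing 0 < 0 then d1.insert ing 0 else d1
      else d).items
    = d.items.map (fun p => if p.1 = ing then (p.1, max 0 (p.2 - qu * quantite)) else p) := by
  by_cases hc : d.contains ing
  · simp only [hc, if_true, PySem.Dict.modify, PySem.Dict.getD_insert_self]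
    by_cases hneg : d.getD ing 0 - qu * quantite < 0
    · simp only [hneg, if_true, PySem.Dict.insert_insert_self]
      rw [PySem.Dict.items_insert_of_contains d 0 hc]
      apply List.map_congr_left
      intro p hp
      by_cases h1 : p.1 = ing
      · have hv := PySem.Dict.getD_of_mem_items d (k := p.1) (v := p.2) (by exact hp) hd 0
        simp only [h1] at hv
        rw [hv] at hneg
        simp only [h1, beq_self_eq_true, if_true]
        have hmax : max 0 (p.2 - qu * quantite) = 0 := by omega
        rw [hmax]
      · simp [h1]
    · simp only [hneg, if_false]
      rw [PySem.Dict.items_insert_of_contains d _ hc]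
      apply List.map_congr_left
      intro p hp
      by_cases h1 : p.1 = ing
      · have hv := PySem.Dict.getD_of_mem_items d (k := p.1) (v := p.2) (by exact hp) hd 0
        simp only [h1] at hv
        rw [hv] at hneg
        simp only [h1, beq_self_eq_true, if_true, hv]
        have hmax : max 0 (p.2 - qu * quantite) = p.2 - qu * quantite := by omega
        rw [hmax]
      · simp [h1]
  · rw [if_neg hc]
    have hnone : ∀ p ∈ d.items, p.1 ≠ ing := by
      intro p hp h
      apply hc
      rw [show d = PySem.Dict.mk d.items from rfl, PySem.Dict.contains_mk]
      exact List.any_eq_true.mpr ⟨p, hp, by simp [h]⟩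
    conv_lhs => rw [← List.map_id d.items]
    apply List.map_congr_left
    intro p hp
    simp [hnone p hp]

-- A's loop step keeps the key sequence (hence its Nodup-ness) unchanged.
lemma pv_step_keys (quantite : Int) (d : PySem.Dict String Int) (hd : d.keys.Nodup) (ing : String) (qu : Int) :
    (if d.contains ing then
        let d1 := d.modify ing 0 (fun v => v - qu * quantite)
        if d1.getD ing 0 < 0 then d1.insert ing 0 else d1
      else d).keys = d.keys := by
  show List.map Prod.fst (_ : PySem.Dict String Int).items = List.map Prod.fst d.items
  rw [pv_step_items quantite d hd ing qu, List.map_map]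
  apply List.map_congr_left
  intro p _
  by_cases h : p.1 = ing <;> simp [h]

-- A's whole loop over the recipe equals B's per-item rewrite of the inventory items.
lemma pv_fold_items (quantite : Int) : ∀ (recette : List (String × Int)) (d : PySem.Dict String Int),
    d.keys.Nodup → (recette.map Prod.fst).Nodup →
    (recette.foldl (fun d p =>
        if d.contains p.1 then
          let d1 := d.modify p.1 0 (fun v => v - p.2 * quantite)
          if d1.getD p.1 0 < 0 then d1.insert p.1 0 else d1
        else d) d).items
    = d.items.map (fun p =>
        if (PySem.Dict.mk recette).contains p.1 then
          (p.1, max 0 (p.2 - (PySem.Dict.mk recette).getD p.1 0 * quantite))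
        else p) := by
  intro recette
  induction recette with
  | nil =>
    intro d _ _
    simp [PySem.Dict.contains_mk]
  | cons hd tl ih =>
    intro d hdnd hr
    obtain ⟨ing, qu⟩ := hd
    simp only [List.map_cons, List.nodup_cons] at hr
    rw [List.foldl_cons]
    rw [ih _ (by rw [pv_step_keys quantite d hdnd ing qu]; exact hdnd) hr.2]
    rw [pv_step_items quantite d hdnd ing qu, List.map_map]
    apply List.map_congr_left
    intro p hp
    by_cases h1 : p.1 = ing
    · have hv := PySem.Dict.getD_of_mem_items d (k := p.1) (v := p.2) (by exact hp) hdnd 0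
      have hnotl : (PySem.Dict.mk tl).contains p.1 = false := by
        rw [PySem.Dict.contains_mk, List.any_eq_false]
        intro q hq
        have hqm : q.1 ∈ tl.map Prod.fst := List.mem_map_of_mem hq
        have hqn : q.1 ≠ p.1 := fun he => hr.1 (h1 ▸ he ▸ hqm)
        simpa using hqn
      have hch : (PySem.Dict.mk ((ing, qu) :: tl)).contains p.1 = true := by
        rw [PySem.Dict.contains_mk, List.any_cons]
        simp [h1]
      have hgd : (PySem.Dict.mk ((ing, qu) :: tl)).getD p.1 0 = qu := by
        rw [PySem.Dict.getD_eq_get?_getD, PySem.Dict.get?_mk_cons]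
        simp [h1]
      simp only [Function.comp_apply, if_pos h1, hnotl, Bool.false_eq_true, if_false, hch, if_true,
        hgd]
    · have hne : (ing == p.1) = false := by simp [Ne.symm h1]
      have hcc : (PySem.Dict.mk ((ing, qu) :: tl)).contains p.1 = (PySem.Dict.mk tl).contains p.1 := by
        rw [PySem.Dict.contains_mk, PySem.Dict.contains_mk, List.any_cons, hne]
        simp
      have hgg : (PySem.Dict.mk ((ing, qu) :: tl)).getD p.1 0 = (PySem.Dict.mk tl).getD p.1 0 := by
        rw [PySem.Dict.getD_eq_get?_getD, PySem.Dict.getD_eq_get?_getD, PySem.Dict.get?_mk_cons, hne]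
        simp
      simp only [Function.comp_apply, if_neg h1, hcc, hgg]

-- ===== VERDICT (by name: the statement is the Claim_ definition above) =====
theorem mettre_a_jour_inventaire_spec : Claim_equal_mettre_a_jour_inventaire := by
  intro inventaire recette quantite _ hpre
  unfold Spec_mettre_a_jour_inventaire mettre_a_jour_inventaire mettre_a_jour_inventaire_alt
  rw [pv_fold_items quantite recette (PySem.Dict.mk inventaire) hpre.1 hpre.2]
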